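-- pv_equiv track=rewrite | github.com/irena-flextool/flextool | flextool/gui/cli_format.py | format_cmd_for_log
-- ===== SOURCE A (Python) =====
-- def format_cmd_for_log(cmd: list[str]) -> str:
--     """Format a command list into a multi-line string with bash \\ continuations.
--
--     Groups each ``--flag`` with its argument values on the same line.
--     The result is copy-pasteable into a bash terminal.
--
--     Example::
--
--         python -m flextool.cli.cmd_scenario_results \\
--           --parquet-base-dir /path/to/dir \\
--           --alternatives DES DES-Invest PES TES \\
--           --plot-dir /path/to/plots
--     """
--     if not cmd:
--         return ''
--
--     lines: list[str] = []
--     current: list[str] = []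
--
--     for token in cmd:
--         if token.startswith('--') and current:
--             # Flush previous group
--             lines.append(' '.join(current))
--             current = [token]
--         else:
--             current.append(token)
--
--     if current:
--         lines.append(' '.join(current))
--
--     if len(lines) <= 1:
--         return lines[0] if lines else ''
--
--     # Join with \ continuation; indent continuation lines
--     return ' \\\n  '.join(lines)
-- ===== SOURCE B (Python) =====
-- def format_cmd_for_log(cmd: list[str]) -> str:
--     """Recursive decomposition: peel off one '--flag + arguments' group per call."""
--     if not cmd:
--         return ''
--     i = 1
--     while i < len(cmd) and not cmd[i].startswith('--'):
--         i += 1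
--     first = ' '.join(cmd[:i])
--     tail = format_cmd_for_log(cmd[i:])
--     return first if not tail else first + ' \\\n  ' + tail
-- ===== Notes on version B (the rewrite author's own statement) =====
-- stated objective: simpler
-- what changed: Replaces A's single-pass fold with lines/current accumulators, flush logic and two trailing guards by a short recursion that peels one '--flag + arguments' group per call and joins the rest recursively; the empty/single-line special cases disappear.
import Mathlib
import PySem

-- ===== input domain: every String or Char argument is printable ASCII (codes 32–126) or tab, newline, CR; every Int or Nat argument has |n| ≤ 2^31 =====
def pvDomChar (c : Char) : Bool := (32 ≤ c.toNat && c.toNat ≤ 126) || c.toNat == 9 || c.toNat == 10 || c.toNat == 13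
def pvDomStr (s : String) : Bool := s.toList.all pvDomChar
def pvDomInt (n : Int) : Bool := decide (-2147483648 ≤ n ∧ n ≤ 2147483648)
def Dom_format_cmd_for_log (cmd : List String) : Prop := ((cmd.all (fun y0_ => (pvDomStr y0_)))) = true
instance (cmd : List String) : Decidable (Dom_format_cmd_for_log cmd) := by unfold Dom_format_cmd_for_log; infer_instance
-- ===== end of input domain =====

-- B replaces A's accumulator fold by a recursion peeling one '--flag + args' group per call (objective: simpler).

-- ===== PORT A =====
def format_cmd_for_log (cmd : List String) : String :=
  if cmd = [] then "" else
    let st := cmd.foldl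
      (fun (st : List String × List String) token =>
        if PySem.Str.startswith token "--" && !st.2.isEmpty then
          (st.1 ++ [PySem.Str.join " " st.2], [token])
        else
          (st.1, st.2 ++ [token]))
      ([], [])
    let lines := if !st.2.isEmpty then st.1 ++ [PySem.Str.join " " st.2] else st.1
    if lines.length ≤ 1 then (match lines with | [] => "" | l :: _ => l)
    else PySem.Str.join " \\\n  " lines

-- ===== PORT B =====
-- Source B's index scan 'i = 1; while i < len(cmd) and not cmd[i].startswith("--")' splits cmd
-- exactly into cmd[:i] = head :: rest.takeWhile and cmd[i:] = rest.dropWhile.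
def format_cmd_for_log_alt : List String → String
  | [] => ""
  | head :: rest =>
    let pre := rest.takeWhile (fun t => !(PySem.Str.startswith t "--"))
    let post := rest.dropWhile (fun t => !(PySem.Str.startswith t "--"))
    let first := PySem.Str.join " " (head :: pre)
    let tail := format_cmd_for_log_alt post
    if tail = "" then first else first ++ " \\\n  " ++ tail
termination_by cmd => cmd.length
decreasing_by
  simp only [List.length_cons]
  exact Nat.lt_succ_of_le (List.length_dropWhile_le _ _)

-- ===== PRECONDITION & SPEC =====
def Spec_format_cmd_for_log (cmd : List String) (out : String) : Prop := out = format_cmd_for_log_alt cmd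
instance (cmd : List String) (out : String) : Decidable (Spec_format_cmd_for_log cmd out) := by unfold Spec_format_cmd_for_log; infer_instance

-- ===== CLAIM (what is proved, stated in full; the proofs are below) =====
def Claim_equal_format_cmd_for_log : Prop := ∀ (cmd : List String), Dom_format_cmd_for_log cmd → Spec_format_cmd_for_log cmd (format_cmd_for_log cmd)

-- ===== LEMMAS AND PROOFS =====

-- the grouping both programs compute, as an explicit list of token groups
def pvGroups (cur : List String) : List String → List (List String)
  | [] => [cur]
  | t :: rest =>
    if PySem.Str.startswith t "--" then cur :: pvGroups [t] rest
    else pvGroups (cur ++ [t]) rest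

theorem pvGroups_ne_nil (cur : List String) (l : List String) : pvGroups cur l ≠ [] := by
  induction l generalizing cur with
  | nil => simp [pvGroups]
  | cons t r ih => simp only [pvGroups]; split <;> simp [ih]

theorem str_join_singleton (sep a : String) : PySem.Str.join sep [a] = a := by
  simp [PySem.Str.join]

theorem str_join_cons_cons (sep a b : String) (l : List String) :
    PySem.Str.join sep (a :: b :: l) = a ++ sep ++ PySem.Str.join sep (b :: l) := by
  simp [PySem.Str.join, PySem.Chars.join_cons_cons, String.append_assoc]

theorem toList_ne_nil_of_startswith (x : String) (h : PySem.Str.startswith x "--" = true) :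
    x.toList ≠ [] := by
  have hpre : "--".toList <+: x.toList :=
    (PySem.Chars.startswith_iff (s := x.toList) (p := "--".toList)).mp (by simpa using h)
  intro hn
  rw [hn] at hpre
  have : "--".toList = [] := List.prefix_nil.mp hpre
  simp at this

theorem join_cons_toList_ne_nil (sep a : String) (l : List String) (h : a.toList ≠ []) :
    (PySem.Str.join sep (a :: l)).toList ≠ [] := by
  cases l with
  | nil => rw [str_join_singleton]; exact h
  | cons b r =>
    rw [str_join_cons_cons]
    simp only [String.toList_append]
    intro he
    exact h (List.append_eq_nil_iff.mp (List.append_eq_nil_iff.mp he).1).1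

theorem join_cons_ne_empty (sep a : String) (l : List String) (h : a.toList ≠ []) :
    PySem.Str.join sep (a :: l) ≠ "" := by
  intro he
  have := join_cons_toList_ne_nil sep a l h
  rw [he] at this
  simp at this

theorem dropWhile_head_false {α : Type} (p : α → Bool) (l : List α) (x : α) (r : List α)
    (h : l.dropWhile p = x :: r) : p x = false := by
  induction l with
  | nil => simp [List.dropWhile] at h
  | cons a t ih =>
    by_cases hp : p a
    · rw [List.dropWhile_cons_of_pos hp] at h; exact ih h
    · rw [List.dropWhile_cons_of_neg hp] at h
      cases h; simpa using hp

theorem pvGroups_split (rest : List String) (cur : List String) :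
    pvGroups cur rest =
      (cur ++ rest.takeWhile (fun t => !(PySem.Str.startswith t "--"))) ::
        (match rest.dropWhile (fun t => !(PySem.Str.startswith t "--")) with
          | [] => []
          | x :: r => pvGroups [x] r) := by
  induction rest generalizing cur with
  | nil => simp [pvGroups]
  | cons t r ih =>
    by_cases hf : PySem.Str.startswith t "--" = true
    · rw [show pvGroups cur (t :: r) = cur :: pvGroups [t] r from by rw [pvGroups, if_pos hf]]
      rw [List.takeWhile_cons, List.dropWhile_cons]
      simp only [hf]
      simp
    · rw [show pvGroups cur (t :: r) = pvGroups (cur ++ [t]) r from by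
        rw [pvGroups, if_neg hf]]
      rw [ih (cur ++ [t])]
      rw [List.takeWhile_cons, List.dropWhile_cons]
      simp only [eq_false_of_ne_true hf]
      simp

-- the finalization A performs after its fold
def pvFin (st : List String × List String) : List String :=
  if !st.2.isEmpty then st.1 ++ [PySem.Str.join " " st.2] else st.1

theorem fold_fin (rest : List String) (lines cur : List String) (hc : cur ≠ []) :
    pvFin (rest.foldl
      (fun (st : List String × List String) token =>
        if PySem.Str.startswith token "--" && !st.2.isEmpty then
          (st.1 ++ [PySem.Str.join " " st.2], [token])
        else
          (st.1, st.2 ++ [token]))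
      (lines, cur))
    = lines ++ (pvGroups cur rest).map (PySem.Str.join " ") := by
  induction rest generalizing lines cur with
  | nil => simp [pvFin, pvGroups, hc]
  | cons t r ih =>
    rw [List.foldl_cons]
    by_cases hf : PySem.Str.startswith t "--" = true
    · rw [if_pos (by rw [Bool.and_eq_true]; exact ⟨hf, by simp [hc]⟩)]
      rw [ih (lines ++ [PySem.Str.join " " cur]) [t] (by simp)]
      rw [show pvGroups cur (t :: r) = cur :: pvGroups [t] r from by rw [pvGroups, if_pos hf]]
      simp
    · rw [if_neg (by intro hcond; rw [Bool.and_eq_true] at hcond; exact hf hcond.1)]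
      rw [ih lines (cur ++ [t]) (by simp)]
      rw [show pvGroups cur (t :: r) = pvGroups (cur ++ [t]) r from by rw [pvGroups, if_neg hf]]

theorem A_closed (h : String) (rest : List String) :
    format_cmd_for_log (h :: rest) =
      PySem.Str.join " \\\n  " ((pvGroups [h] rest).map (PySem.Str.join " ")) := by
  have hstep : format_cmd_for_log (h :: rest) =
      (let st := rest.foldl
        (fun (st : List String × List String) token =>
          if PySem.Str.startswith token "--" && !st.2.isEmpty then
            (st.1 ++ [PySem.Str.join " " st.2], [token])
          else
            (st.1, st.2 ++ [token]))
        ([], [h])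
      let lines := pvFin st
      if lines.length ≤ 1 then (match lines with | [] => "" | l :: _ => l)
      else PySem.Str.join " \\\n  " lines) := by
    simp [format_cmd_for_log, pvFin, List.foldl_cons]
  rw [hstep]
  simp only []
  rw [fold_fin rest [] [h] (by simp)]
  simp only [List.nil_append]
  rcases hg : (pvGroups [h] rest).map (PySem.Str.join " ") with _ | ⟨j, js⟩
  · exact absurd (List.map_eq_nil_iff.mp hg) (pvGroups_ne_nil _ _)
  · cases js with
    | nil => simp [str_join_singleton]
    | cons j2 js2 => simp

theorem B_closed_aux (n : Nat) : ∀ (cmd : List String), cmd.length ≤ n →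
    format_cmd_for_log_alt cmd =
      match cmd with
      | [] => ""
      | h :: rest => PySem.Str.join " \\\n  " ((pvGroups [h] rest).map (PySem.Str.join " ")) := by
  induction n with
  | zero =>
    intro cmd hlen
    have : cmd = [] := List.eq_nil_of_length_eq_zero (Nat.le_zero.mp hlen)
    subst this
    simp [format_cmd_for_log_alt]
  | succ n ih =>
    intro cmd hlen
    cases cmd with
    | nil => simp [format_cmd_for_log_alt]
    | cons h rest =>
      simp only [format_cmd_for_log_alt]
      rcases hp : rest.dropWhile (fun t => !(PySem.Str.startswith t "--")) with _ | ⟨x, r⟩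
      · rw [pvGroups_split rest [h], hp]
        rw [if_pos (by simp [format_cmd_for_log_alt])]
        simp [str_join_singleton]
      · have hx : PySem.Str.startswith x "--" = true := by
          simpa using dropWhile_head_false (fun t => !(PySem.Str.startswith t "--")) rest x r hp
        have hlen' : (x :: r).length ≤ n := by
          have hd := List.length_dropWhile_le (fun t => !(PySem.Str.startswith t "--")) rest
          rw [hp] at hd
          simp only [List.length_cons] at hd hlen ⊢
          omega
        rw [ih (x :: r) hlen']
        simp only []
        rcases hg : (pvGroups [x] r).map (PySem.Str.join " ") with _ | ⟨j, js⟩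
        · exact absurd (List.map_eq_nil_iff.mp hg) (pvGroups_ne_nil _ _)
        · have hjx : j.toList ≠ [] := by
            rw [pvGroups_split r [x]] at hg
            simp only [List.map_cons, List.cons_append, List.nil_append] at hg
            obtain ⟨hj, -⟩ := List.cons_eq_cons.mp hg
            rw [← hj]
            exact join_cons_toList_ne_nil " " x _ (toList_ne_nil_of_startswith x hx)
          rw [if_neg (join_cons_ne_empty _ j js hjx)]
          rw [pvGroups_split rest [h], hp]
          simp only [List.map_cons, List.cons_append, List.nil_append]
          rw [hg, str_join_cons_cons]

theorem B_closed (cmd : List String) :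
    format_cmd_for_log_alt cmd =
      match cmd with
      | [] => ""
      | h :: rest => PySem.Str.join " \\\n  " ((pvGroups [h] rest).map (PySem.Str.join " ")) :=
  B_closed_aux cmd.length cmd (Nat.le_refl _)

-- ===== VERDICT (by name: the statement is the Claim_ definition above) =====
theorem format_cmd_for_log_spec : Claim_equal_format_cmd_for_log := by
  intro cmd _
  unfold Spec_format_cmd_for_log
  cases cmd with
  | nil => simp [format_cmd_for_log, format_cmd_for_log_alt]
  | cons h rest => rw [A_closed, B_closed]
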